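-- pv_equiv track=rewrite | github.com/XyzHuy/-DL-Fine-tuning-coding-model | data/solution/Solution1933.py | isDecomposable
-- ===== SOURCE A (Python) =====
-- def isDecomposable(s: str) -> bool:
--     count = 1
--     has_length_two = False
--
--     for i in range(1, len(s)):
--         if s[i] == s[i - 1]:
--             count += 1
--         else:
--             if count % 3 == 1:
--                 return False
--             elif count % 3 == 2:
--                 if has_length_two:
--                     return False
--                 has_length_two = True
--             count = 1
--
--     # Check the last group
--     if count % 3 == 1:
--         return False
--     elif count % 3 == 2:
--         if has_length_two:
--             return False
--         has_length_two = True
--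
--     return has_length_two
-- ===== SOURCE B (Python) =====
-- def isDecomposable(s: str) -> bool:
--     # Simulate the decomposition directly: greedily peel off a block of three
--     # equal characters, otherwise (at most once) a block of two.
--     n = len(s)
--     i = 0
--     used_pair = False
--     while i < n:
--         if i + 3 <= n and s[i] == s[i + 1] == s[i + 2]:
--             i += 3
--         elif not used_pair and i + 2 <= n and s[i] == s[i + 1]:
--             used_pair = True
--             i += 2
--         else:
--             return False
--     return used_pair
-- ===== Notes on version B (the rewrite author's own statement) =====
-- stated objective: alternative
-- what changed: A counts run lengths in one scan and tests each run mod 3 with a has_length_two flag; B contains no run counting or mod arithmetic at all: it directly simulates the decomposition, greedily peeling off a block of three equal characters and otherwise (at most once) a block of two, returning whether the whole string is consumed with the pair used.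
import Mathlib
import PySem

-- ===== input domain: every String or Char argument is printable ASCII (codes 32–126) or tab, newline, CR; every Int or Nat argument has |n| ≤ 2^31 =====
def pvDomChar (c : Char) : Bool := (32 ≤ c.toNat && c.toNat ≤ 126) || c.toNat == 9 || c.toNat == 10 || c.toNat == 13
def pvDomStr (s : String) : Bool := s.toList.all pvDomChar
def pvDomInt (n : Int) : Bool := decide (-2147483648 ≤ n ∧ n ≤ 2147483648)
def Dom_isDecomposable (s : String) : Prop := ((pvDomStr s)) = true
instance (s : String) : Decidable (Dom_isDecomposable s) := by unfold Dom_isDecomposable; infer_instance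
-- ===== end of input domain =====

-- B replaces A's run-length-counting scan (mod-3 tests with a flag) by a direct greedy
-- simulation of the decomposition into blocks of 3 and one block of 2 (objective:
-- alternative algorithm, same cost).

-- ===== PORT A =====
-- loop body of A: state 'none' models A's early 'return False'; all indices i of
-- range(1, len(s)) are in range, so the pyGetD default is never used.
def pvALoop (cs : List Char) (st : Option (Nat × Bool)) (i : Int) : Option (Nat × Bool) :=
  match st with
  | none => none
  | some (count, h2) =>
    if PySem.List.pyGetD cs i ' ' == PySem.List.pyGetD cs (i - 1) ' ' then
      some (count + 1, h2)
    else if count % 3 == 1 then none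
    else if count % 3 == 2 then
      (if h2 then none else some (1, true))
    else some (1, h2)

def isDecomposable (s : String) : Bool :=
  let cs := s.toList
  match (PySem.List.pyRange 1 (PySem.Str.len s) 1).foldl (pvALoop cs) (some (1, false)) with
  | none => false
  | some (count, h2) =>
    if count % 3 == 1 then false
    else if count % 3 == 2 then (if h2 then false else true)
    else h2

-- ===== PORT B =====
-- Source B's while loop over the index i with the used_pair flag; indices in the guards are
-- always in range when read, so the pyGetD default is never used.
def pvBLoop (cs : List Char) (i : Nat) (usedPair : Bool) : Bool :=
  if i < cs.length then
    if (i + 3 ≤ cs.length)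
        && (PySem.List.pyGetD cs (i : Int) ' ' == PySem.List.pyGetD cs ((i : Int) + 1) ' ')
        && (PySem.List.pyGetD cs ((i : Int) + 1) ' ' == PySem.List.pyGetD cs ((i : Int) + 2) ' ') then
      pvBLoop cs (i + 3) usedPair
    else if (!usedPair) && (i + 2 ≤ cs.length)
        && (PySem.List.pyGetD cs (i : Int) ' ' == PySem.List.pyGetD cs ((i : Int) + 1) ' ') then
      pvBLoop cs (i + 2) true
    else false
  else usedPair
  termination_by cs.length - i

def isDecomposable_alt (s : String) : Bool :=
  pvBLoop s.toList 0 false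

-- ===== PRECONDITION & SPEC =====
def Spec_isDecomposable (s : String) (out : Bool) : Prop := out = isDecomposable_alt s
instance (s : String) (out : Bool) : Decidable (Spec_isDecomposable s out) := by unfold Spec_isDecomposable; infer_instance

-- ===== CLAIM (what is proved, stated in full; the proofs are below) =====
def Claim_equal_isDecomposable : Prop := ∀ (s : String), Dom_isDecomposable s → Spec_isDecomposable s (isDecomposable s)

-- ===== LEMMAS AND PROOFS =====

-- A's step, rephrased on a (previous char, current char) pair
def pvStepPair (st : Option (Nat × Bool)) (p : Char × Char) : Option (Nat × Bool) :=
  match st with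
  | none => none
  | some (count, h2) =>
    if p.2 == p.1 then some (count + 1, h2)
    else if count % 3 == 1 then none
    else if count % 3 == 2 then
      (if h2 then none else some (1, true))
    else some (1, h2)

-- A's final block applied to the loop state
def pvFinishA : Option (Nat × Bool) → Bool
  | none => false
  | some (count, h2) =>
    if count % 3 == 1 then false
    else if count % 3 == 2 then (if h2 then false else true)
    else h2

-- run-length table (proof-only: the common characterisation both ports are reduced to)
def pvRuns : List Char → List Nat
  | [] => []
  | c :: cs =>
      ((cs.takeWhile (· == c)).length + 1) :: pvRuns (cs.dropWhile (· == c))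
  termination_by l => l.length
  decreasing_by
    simpa using Nat.lt_succ_of_le (List.length_dropWhile_le (· == c) cs)

-- A's behaviour as a recursion over the run-length table
def pvCheckAux : Bool → List Nat → Bool
  | h2, [] => h2
  | h2, r :: rs =>
    if r % 3 == 1 then false
    else if r % 3 == 2 then (if h2 then false else pvCheckAux true rs)
    else pvCheckAux h2 rs

def pvAddHead (m : Nat) : List Nat → List Nat
  | [] => []
  | h :: t => (m + h) :: t

-- B's loop as a structural recursion on the remaining suffix
def pvGo : List Char → Bool → Bool
  | a :: b :: c :: t, u =>
    if a == b && b == c then pvGo t u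
    else if !u && a == b then pvGo (c :: t) true
    else false
  | [a, b], u => if !u && a == b then true else false
  | [_], _ => false
  | [], u => u
  termination_by l => l.length

theorem pvRuns_cons (c : Char) (cs : List Char) :
    pvRuns (c :: cs) = ((cs.takeWhile (· == c)).length + 1) :: pvRuns (cs.dropWhile (· == c)) := by
  rw [pvRuns]

theorem pvRuns_cons_cons (d : Char) (ds : List Char) :
    pvRuns (d :: d :: ds) = pvAddHead 1 (pvRuns (d :: ds)) := by
  rw [pvRuns_cons, pvRuns_cons]
  simp only [List.takeWhile_cons, List.dropWhile_cons, beq_self_eq_true,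
    if_true, List.length_cons, pvAddHead]
  have e : (List.takeWhile (fun x => x == d) ds).length + 1 + 1
      = 1 + ((List.takeWhile (fun x => x == d) ds).length + 1) := by omega
  rw [e]

theorem pvRuns_ne_nil (c : Char) (cs : List Char) : pvRuns (c :: cs) ≠ [] := by
  rw [pvRuns_cons]; simp

theorem pvALoop_eq_pairs (cs : List Char) : ∀ (k a : Nat), cs.length - (a + 1) = k →
    ∀ st : Option (Nat × Bool),
    (PySem.List.pyRange ((a : Int) + 1) (cs.length : Int) 1).foldl (pvALoop cs) st
      = ((cs.zip cs.tail).drop a).foldl pvStepPair st := by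
  intro k
  induction k with
  | zero =>
    intro a ha st
    rw [PySem.List.pyRange_one_eq_nil (by omega),
      List.drop_eq_nil_of_le (by simp [List.length_zip]; omega)]
    rfl
  | succ k ih =>
    intro a ha st
    have hlt : (a : Int) + 1 < (cs.length : Int) := by omega
    rw [PySem.List.pyRange_one_cons hlt]
    have ha1 : a + 1 < cs.length := by omega
    have hz : a < (cs.zip cs.tail).length := by
      simp [List.length_zip, List.length_tail]; omega
    rw [List.drop_eq_getElem_cons hz]
    simp only [List.foldl_cons]
    have hget : (cs.zip cs.tail)[a] = (cs[a]'(by omega), cs[a + 1]'ha1) := by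
      simp [List.getElem_zip, List.getElem_tail]
    have hstep : pvALoop cs st ((a : Int) + 1) = pvStepPair st ((cs.zip cs.tail)[a]) := by
      rw [hget]
      unfold pvALoop pvStepPair
      have t1 : (((a : Int) + 1)).toNat = a + 1 := by omega
      have t2 : (((a : Int) + 1 - 1)).toNat = a := by omega
      rw [PySem.List.pyGetD_eq_getElem cs ' ' (by omega) (by omega),
        PySem.List.pyGetD_eq_getElem cs ' ' (by omega) (by omega)]
      simp only [t1, t2]
    rw [hstep]
    have := ih (a + 1) (by omega) (pvStepPair st ((cs.zip cs.tail)[a]))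
    simpa using this

theorem pvALoop_eq_pairs' (cs : List Char) (st : Option (Nat × Bool)) :
    (PySem.List.pyRange 1 (cs.length : Int) 1).foldl (pvALoop cs) st
      = (cs.zip cs.tail).foldl pvStepPair st := by
  have h := pvALoop_eq_pairs cs (cs.length - 1) 0 (by omega) st
  norm_num at h
  exact h

theorem pvPairs_eq_checkAux : ∀ (cs : List Char) (c : Char) (m : Nat) (h2 : Bool),
    pvFinishA (((c :: cs).zip cs).foldl pvStepPair (some (m + 1, h2)))
      = pvCheckAux h2 (pvAddHead m (pvRuns (c :: cs))) := by
  intro cs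
  induction cs with
  | nil =>
    intro c m h2
    rw [pvRuns_cons]
    simp only [List.zip_nil_right, List.foldl_nil, List.takeWhile_nil,
      List.dropWhile_nil, List.length_nil, pvRuns, pvAddHead, pvFinishA]
    have hm : (m + 1) % 3 = 0 ∨ (m + 1) % 3 = 1 ∨ (m + 1) % 3 = 2 := by omega
    have e : m + (0 + 1) = m + 1 := by omega
    rw [e]
    rcases hm with h | h | h <;> simp [pvCheckAux, h]
  | cons d ds ih =>
    intro c m h2
    rw [List.zip_cons_cons, List.foldl_cons]
    by_cases hdc : d = c
    · subst hdc
      have hs : pvStepPair (some (m + 1, h2)) (d, d) = some (m + 1 + 1, h2) := by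
        simp [pvStepPair]
      rw [hs]
      rw [pvRuns_cons_cons]
      have := ih d (m + 1) h2
      rw [this]
      rcases h : pvRuns (d :: ds) with _ | ⟨r, rs⟩
      · simp [pvAddHead]
      · simp only [pvAddHead]
        have e : m + 1 + r = m + (1 + r) := by omega
        rw [e]
    · have hne : (d == c) = false := by simp [hdc]
      have hruns : pvRuns (c :: d :: ds) = 1 :: pvRuns (d :: ds) := by
        rw [pvRuns_cons]
        simp [hne]
      rw [hruns]
      simp only [pvStepPair, hne, Bool.false_eq_true, if_false, pvAddHead]
      have hm : (m + 1) % 3 = 0 ∨ (m + 1) % 3 = 1 ∨ (m + 1) % 3 = 2 := by omega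
      have hnone : ∀ p, pvStepPair none p = none := fun p => rfl
      rcases hm with h | h | h
      · simp only [h, pvCheckAux]
        norm_num
        have := ih d 0 h2
        rw [pvRuns_cons] at this ⊢
        simpa [pvAddHead] using this
      · simp only [h, pvCheckAux]
        norm_num
        simp [pvFinishA, List.foldl_fixed' hnone]
      · simp only [h, pvCheckAux]
        norm_num
        by_cases hh : h2
        · subst hh
          simp [pvFinishA, List.foldl_fixed' hnone]
        · simp only [hh, Bool.false_eq_true, if_false]
          have := ih d 0 true
          rw [pvRuns_cons] at this ⊢
          simpa [pvAddHead, hh] using this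

-- the head of a run-length table keeps its mod-3 class under pvAddHead 3
theorem pvCheckAux_addHead3 (u : Bool) (r : Nat) (rs : List Nat) :
    pvCheckAux u (pvAddHead 3 (r :: rs)) = pvCheckAux u (r :: rs) := by
  simp only [pvAddHead, pvCheckAux]
  have e1 : (3 + r) % 3 = r % 3 := by omega
  rw [e1]

-- B's structural loop computes the same run-table recursion as A
theorem pvGo_eq_checkAux : ∀ (cs : List Char) (u : Bool),
    pvGo cs u = pvCheckAux u (pvRuns cs) := by
  intro cs u
  induction cs, u using pvGo.induct with
  | case1 a b c t u hb ih =>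
    have hab : a = b := by
      have := (Bool.and_eq_true _ _).mp hb
      exact eq_of_beq this.1
    have hbc : b = c := by
      have := (Bool.and_eq_true _ _).mp hb
      exact eq_of_beq this.2
    subst hab; subst hbc
    rw [pvGo]
    simp only [beq_self_eq_true, Bool.and_self, if_true]
    rw [ih, pvRuns_cons_cons, pvRuns_cons_cons]
    rcases ht : t with _ | ⟨d, t'⟩
    · simp [pvRuns, pvAddHead, pvCheckAux]
    · by_cases hda : d = a
      · subst hda
        rw [pvRuns_cons_cons]
        rcases hr : pvRuns (d :: t') with _ | ⟨r, rs⟩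
        · exact absurd hr (pvRuns_ne_nil d t')
        · simp only [pvAddHead]
          have e : 1 + (1 + (1 + r)) = 3 + r := by omega
          rw [e]
          have := (pvCheckAux_addHead3 u r rs).symm
          simpa [pvAddHead] using this
      · have hne : (d == a) = false := by simp [hda]
        have hruns : pvRuns (a :: d :: t') = 1 :: pvRuns (d :: t') := by
          rw [pvRuns_cons]; simp [hne]
        rw [hruns]
        simp only [pvAddHead, pvCheckAux]
        norm_num
  | case2 a b c t u hb1 hb2 ih =>
    have hu : u = false := by
      rcases (Bool.and_eq_true _ _).mp hb2 with ⟨h1, _⟩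
      simpa using h1
    have hab : a = b := by
      rcases (Bool.and_eq_true _ _).mp hb2 with ⟨_, h2⟩
      exact eq_of_beq h2
    subst hab; subst hu
    have hbc : ¬ a = c := by
      intro h; exact hb1 (by simp [h])
    have hne : (c == a) = false := by
      simp only [beq_eq_false_iff_ne, ne_eq]
      exact fun h => hbc h.symm
    have hruns : pvRuns (a :: a :: c :: t) = 2 :: pvRuns (c :: t) := by
      rw [pvRuns_cons]
      simp [hne]
    rw [pvGo]
    have hcond : (a == a && a == c) = false := by simp [hbc]
    rw [hcond]
    simp only [Bool.false_eq_true, if_false, Bool.not_false, beq_self_eq_true, Bool.and_self, if_true]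
    rw [ih, hruns]
    simp [pvCheckAux]
  | case3 a b c t u hb1 hb2 =>
    rw [pvGo]
    rw [if_neg hb1, if_neg hb2]
    by_cases hab : a = b
    · subst hab
      cases u with
      | false => exact absurd (by simp) hb2
      | true =>
        have hbc : ¬ a = c := by
          intro h; exact hb1 (by simp [h])
        have hne : (c == a) = false := by
          simp only [beq_eq_false_iff_ne, ne_eq]
          exact fun h => hbc h.symm
        have hruns : pvRuns (a :: a :: c :: t) = 2 :: pvRuns (c :: t) := by
          rw [pvRuns_cons]
          simp [hne]
        rw [hruns]
        simp [pvCheckAux]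
    · have hne : (b == a) = false := by
        simp only [beq_eq_false_iff_ne, ne_eq]
        exact fun h => hab h.symm
      have hruns : pvRuns (a :: b :: c :: t) = 1 :: pvRuns (b :: c :: t) := by
        rw [pvRuns_cons]; simp [hne]
      rw [hruns]
      simp [pvCheckAux]
  | case4 a b u hb =>
    have hu : u = false := by
      rcases (Bool.and_eq_true _ _).mp hb with ⟨h1, _⟩
      simpa using h1
    have hab : a = b := by
      rcases (Bool.and_eq_true _ _).mp hb with ⟨_, h2⟩
      exact eq_of_beq h2
    subst hab; subst hu
    rw [pvGo]
    have hruns : pvRuns [a, a] = [2] := by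
      rw [pvRuns_cons]; simp [pvRuns]
    rw [hruns]
    simp [pvCheckAux]
  | case5 a b u hb =>
    rw [pvGo]
    rw [if_neg hb]
    by_cases hab : a = b
    · subst hab
      cases u with
      | false => exact absurd (by simp) hb
      | true =>
        have hruns : pvRuns [a, a] = [2] := by
          rw [pvRuns_cons]; simp [pvRuns]
        rw [hruns]
        simp [pvCheckAux]
    · have hne : (b == a) = false := by
        simp only [beq_eq_false_iff_ne, ne_eq]
        exact fun h => hab h.symm
      have hruns : pvRuns [a, b] = [1, 1] := by
        rw [pvRuns_cons]
        simp [hne, pvRuns_cons, pvRuns]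
      rw [hruns]
      simp [pvCheckAux]
  | case6 a u =>
    rw [pvGo]
    have hruns : pvRuns [a] = [1] := by rw [pvRuns_cons]; simp [pvRuns]
    rw [hruns]
    simp [pvCheckAux]
  | case7 u => simp [pvGo, pvRuns, pvCheckAux]

-- the index loop of the B port walks the suffixes of cs
theorem pvBLoop_eq_go (cs : List Char) : ∀ (k i : Nat) (u : Bool), cs.length - i = k →
    pvBLoop cs i u = pvGo (cs.drop i) u := by
  intro k
  induction k using Nat.strong_induction_on with
  | _ k ih =>
    intro i u hk
    by_cases hi : i < cs.length
    · have hd : ∀ (j : Nat) (hj : j < cs.length),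
          PySem.List.pyGetD cs (j : Int) ' ' = cs[j]'hj := by
        intro j hj
        rw [PySem.List.pyGetD_eq_getElem cs ' ' (by omega) (by omega)]
        simp
      have g1 : ((i : Int) + 1) = ((i + 1 : Nat) : Int) := by push_cast; ring
      have g2 : ((i : Int) + 2) = ((i + 2 : Nat) : Int) := by push_cast; ring
      rw [pvBLoop, if_pos hi]
      by_cases h3 : i + 3 ≤ cs.length
      · have hb1 : i < cs.length := by omega
        have hb2 : i + 1 < cs.length := by omega
        have hb3 : i + 2 < cs.length := by omega
        rw [g1, g2, hd i hb1, hd (i+1) hb2, hd (i+2) hb3]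
        have hdrop : cs.drop i = cs[i]'hb1 :: cs[i+1]'hb2 :: cs[i+2]'hb3 :: cs.drop (i + 3) := by
          rw [List.drop_eq_getElem_cons hb1, List.drop_eq_getElem_cons hb2,
            List.drop_eq_getElem_cons hb3]
        rw [hdrop, pvGo]
        by_cases he1 : cs[i]'hb1 = cs[i+1]'hb2
        · by_cases he2 : cs[i+1]'hb2 = cs[i+2]'hb3
          · simp only [h3, decide_true, he1, he2, beq_self_eq_true, Bool.and_self,
              if_true]
            exact ih (cs.length - (i + 3)) (by omega) (i + 3) u rfl
          · have hne2 : (cs[i+1]'hb2 == cs[i+2]'hb3) = false := by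
              simpa using he2
            simp only [h3, decide_true, he1, beq_self_eq_true, hne2,
              Bool.and_false, Bool.false_eq_true, if_false, Bool.and_true]
            cases u with
            | false =>
              have hle2 : i + 2 ≤ cs.length := by omega
              simp only [Bool.not_false, hle2, decide_true, if_true]
              rw [ih (cs.length - (i + 2)) (by omega) (i + 2) true rfl,
                List.drop_eq_getElem_cons hb3]
              norm_num
            | true => simp
        · have hne1 : (cs[i]'hb1 == cs[i+1]'hb2) = false := by simpa using he1
          simp [hne1]
      · have hble : (decide (i + 3 ≤ cs.length)) = false := by simpa using h3
        rw [hble]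
        simp only [Bool.false_and, Bool.false_eq_true, if_false]
        by_cases hle2 : i + 2 ≤ cs.length
        · -- exactly two characters remain
          have hlen : cs.length = i + 2 := by omega
          have hb1 : i < cs.length := by omega
          have hb2 : i + 1 < cs.length := by omega
          rw [g1, hd i hb1, hd (i+1) hb2]
          have hdrop : cs.drop i = [cs[i]'hb1, cs[i+1]'hb2] := by
            rw [List.drop_eq_getElem_cons hb1, List.drop_eq_getElem_cons hb2,
              List.drop_eq_nil_of_le (by omega)]
          rw [hdrop, pvGo]
          by_cases he1 : cs[i]'hb1 = cs[i+1]'hb2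
          · cases u with
            | false =>
              simp only [Bool.not_false, hle2, decide_true, he1, beq_self_eq_true,
                Bool.and_self, if_true]
              rw [ih (cs.length - (i + 2)) (by omega) (i + 2) true rfl]
              rw [List.drop_eq_nil_of_le (by omega), pvGo]
            | true => simp
          · have hne1 : (cs[i]'hb1 == cs[i+1]'hb2) = false := by simpa using he1
            simp [hne1]
        · -- exactly one character remains
          have hlen : cs.length = i + 1 := by omega
          have hb1 : i < cs.length := by omega
          have hble2 : (decide (i + 2 ≤ cs.length)) = false := by simpa using hle2
          rw [hble2]
          have hdrop : cs.drop i = [cs[i]'hb1] := by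
            rw [List.drop_eq_getElem_cons hb1, List.drop_eq_nil_of_le (by omega)]
          rw [hdrop, pvGo]
          simp
    · rw [pvBLoop, if_neg hi, List.drop_eq_nil_of_le (by omega), pvGo]

-- ===== VERDICT (by name: the statement is the Claim_ definition above) =====
theorem isDecomposable_spec : Claim_equal_isDecomposable := by
  intro s _
  unfold Spec_isDecomposable
  show pvFinishA ((PySem.List.pyRange 1 (PySem.Str.len s) 1).foldl
      (pvALoop s.toList) (some (1, false))) = isDecomposable_alt s
  rw [PySem.Str.len_eq, pvALoop_eq_pairs' s.toList (some (1, false))]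
  unfold isDecomposable_alt
  rw [pvBLoop_eq_go s.toList (s.toList.length) 0 false (by omega)]
  simp only [List.drop_zero]
  rw [pvGo_eq_checkAux]
  rcases hcs : s.toList with _ | ⟨c, cs⟩
  · simp [pvRuns, pvFinishA, pvCheckAux]
  · simp only [List.tail_cons]
    have h1 := pvPairs_eq_checkAux cs c 0 false
    rw [h1]
    rcases hr : pvRuns (c :: cs) with _ | ⟨r, rs⟩
    · exact absurd hr (pvRuns_ne_nil c cs)
    · simp [pvAddHead]
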